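-- pv_equiv track=rewrite | github.com/AmMurrr/AutoDrillResearch | app/pages/1_Classic_Approach_MVP.py | _parse_word_mismatch_reason
-- ===== SOURCE A (Python) =====
-- def _parse_word_mismatch_reason(reason: str) -> tuple[str, str]:
--     expected = ""
--     recognized = ""
--     for part in (reason or "").split(";"):
--         if ":" not in part:
--             continue
--         key, value = part.split(":", maxsplit=1)
--         normalized_key = key.strip().lower()
--         if normalized_key == "expected":
--             expected = value.strip()
--         elif normalized_key == "recognized":
--             recognized = value.strip()
--     return expected, recognized
-- ===== SOURCE B (Python) =====
-- def _parse_word_mismatch_reason(reason: str) -> tuple[str, str]: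
--     parts = (reason or "").split(";")
--
--     def last_value(field):
--         for part in reversed(parts):
--             if ":" in part:
--                 key, value = part.split(":", 1)
--                 if key.strip().lower() == field:
--                     return value.strip()
--         return ""
--
--     return last_value("expected"), last_value("recognized")
-- ===== Notes on version B (the rewrite author's own statement) =====
-- stated objective: alternative
-- what changed: B replaces A's single forward accumulating pass with two independent back-to-front searches: for each field it scans the reversed parts list and returns the first matching value (= last occurrence), with early exit and no mutable accumulator.
import Mathlib
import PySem

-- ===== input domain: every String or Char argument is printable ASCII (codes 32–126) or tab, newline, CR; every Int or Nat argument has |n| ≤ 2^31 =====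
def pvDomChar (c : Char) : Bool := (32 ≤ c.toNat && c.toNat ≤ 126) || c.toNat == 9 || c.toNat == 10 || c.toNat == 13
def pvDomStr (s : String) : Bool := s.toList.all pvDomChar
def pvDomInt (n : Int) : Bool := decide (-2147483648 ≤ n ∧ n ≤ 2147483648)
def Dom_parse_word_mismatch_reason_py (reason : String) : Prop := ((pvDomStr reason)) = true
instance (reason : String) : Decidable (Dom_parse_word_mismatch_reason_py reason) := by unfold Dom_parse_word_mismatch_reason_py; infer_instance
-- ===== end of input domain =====

-- B replaces A's forward accumulating pass by two independent back-to-front searches with early exit (alternative decomposition, same cost).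

-- ===== PORT A =====
-- one loop iteration of A: skip parts without ':', else update the matching field of the pair
def pwmStepA (st : String × String) (part : String) : String × String :=
  if PySem.Str.isIn ":" part = false then st
  else
    match (PySem.Str.splitMax? part ":" 1).getD [] with
    | key :: value :: _ =>
      let normalizedKey := PySem.Str.lower (PySem.Str.strip key)
      if normalizedKey = "expected" then (PySem.Str.strip value, st.2)
      else if normalizedKey = "recognized" then (st.1, PySem.Str.strip value)
      else st
    | _ => st

def parse_word_mismatch_reason_py (reason : String) : String × String :=
  (((PySem.Str.split? (if reason = "" then "" else reason) ";").getD []).foldl pwmStepA ("", ""))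

-- ===== PORT B =====
-- B's last_value: first match over the reversed parts list, early exit; d is the fall-through result ("" in B)
def pwmLast (field : String) (revParts : List String) (d : String) : String :=
  match revParts with
  | [] => d
  | part :: rest =>
    if PySem.Str.isIn ":" part then
      match (PySem.Str.splitMax? part ":" 1).getD [] with
      | key :: value :: _ =>
        if PySem.Str.lower (PySem.Str.strip key) = field then PySem.Str.strip value
        else pwmLast field rest d
      | _ => pwmLast field rest d
    else pwmLast field rest d

def parse_word_mismatch_reason_py_alt (reason : String) : String × String :=
  let parts := (PySem.Str.split? (if reason = "" then "" else reason) ";").getD []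
  (pwmLast "expected" parts.reverse "", pwmLast "recognized" parts.reverse "")

-- ===== PRECONDITION & SPEC =====
def Spec_parse_word_mismatch_reason_py (reason : String) (out : String × String) : Prop := out = parse_word_mismatch_reason_py_alt reason
instance (reason : String) (out : String × String) : Decidable (Spec_parse_word_mismatch_reason_py reason out) := by unfold Spec_parse_word_mismatch_reason_py; infer_instance

-- ===== CLAIM =====
def Claim_equal_parse_word_mismatch_reason_py : Prop := ∀ (reason : String), Dom_parse_word_mismatch_reason_py reason → Spec_parse_word_mismatch_reason_py reason (parse_word_mismatch_reason_py reason)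

-- ===== LEMMAS AND PROOFS =====

-- A's fold from st equals B's reverse search, with st's components as the fall-through results
theorem pwm_invariant (parts : List String) (st : String × String) :
    (parts.foldl pwmStepA st).1 = pwmLast "expected" parts.reverse st.1 ∧
    (parts.foldl pwmStepA st).2 = pwmLast "recognized" parts.reverse st.2 := by
  induction parts using List.reverseRecOn generalizing st with
  | nil => exact ⟨rfl, rfl⟩
  | append_singleton l p ih =>
    rw [List.foldl_append, List.reverse_append]
    simp only [List.foldl_cons, List.foldl_nil, List.reverse_cons, List.reverse_nil,
      List.nil_append, List.singleton_append]
    unfold pwmStepA pwmLast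
    cases hc : PySem.Str.isIn ":" p with
    | false => simp only [Bool.false_eq_true, if_true, if_false]; exact ih st
    | true =>
      simp only [Bool.true_eq_false, if_false, if_true]
      rcases (PySem.Str.splitMax? p ":" 1).getD [] with _ | ⟨k, _ | ⟨v, t⟩⟩ <;> simp only []
      · exact ih st
      · exact ih st
      · by_cases he : PySem.Str.lower (PySem.Str.strip k) = "expected"
        · rw [if_pos he, if_pos he, if_neg (by rw [he]; decide)]
          exact ⟨rfl, (ih st).2⟩
        · by_cases hr : PySem.Str.lower (PySem.Str.strip k) = "recognized"
          · rw [if_neg he, if_pos hr, if_neg he, if_pos hr]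
            exact ⟨(ih st).1, rfl⟩
          · rw [if_neg he, if_neg hr, if_neg he, if_neg hr]
            exact ih st

-- ===== VERDICT =====
theorem parse_word_mismatch_reason_py_spec : Claim_equal_parse_word_mismatch_reason_py := by
  intro reason _
  unfold Spec_parse_word_mismatch_reason_py parse_word_mismatch_reason_py parse_word_mismatch_reason_py_alt
  exact Prod.ext (pwm_invariant _ ("", "")).1 (pwm_invariant _ ("", "")).2
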